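-- pv_equiv track=rewrite | github.com/brocla/boggle_solver | helpers.py | normalize_qu
-- ===== SOURCE A (Python) =====
-- def normalize_qu(text):
--     """Yield characters from text, combining 'q' and following 'u' into 'qu'.
--
--     Raises ValueError if 'q' appears without a following 'u'.
--
--     >>> list(normalize_qu("quiet"))
--     ['qu', 'i', 'e', 't']
--     >>> list(normalize_qu("disqualify"))
--     ['d', 'i', 's', 'qu', 'a', 'l', 'i', 'f', 'y']
--     """
--     it = iter(text)
--     for char in it:
--         if char == "q":
--             following = next(it, None)
--             if following != "u":
--                 raise ValueError("'Q' without a 'u'.")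
--             yield "qu"
--         else:
--             yield char
-- ===== SOURCE B (Python) =====
-- def normalize_qu(text):
--     """Yield characters from text, combining 'q' and following 'u' into 'qu'.
--
--     Staged approach: materialize the text, split it on the substring 'qu',
--     validate that no stray 'q' remains in any piece, then emit the pieces'
--     characters with 'qu' re-inserted between them.
--     """
--     s = ''.join(text)
--     first, *rest = s.split('qu')
--     if 'q' in first or any('q' in p for p in rest):
--         raise ValueError("'Q' without a 'u'.")
--     yield from first
--     for p in rest:
--         yield 'qu'
--         yield from p
-- ===== Notes on version B (the rewrite author's own statement) =====
-- stated objective: alternative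
-- what changed: Replaces the character-by-character iterator scan with staged string passes: split the text on the substring 'qu', validate that no stray 'q' remains in any piece, then emit the pieces' characters with 'qu' re-inserted between them.
import Mathlib
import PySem

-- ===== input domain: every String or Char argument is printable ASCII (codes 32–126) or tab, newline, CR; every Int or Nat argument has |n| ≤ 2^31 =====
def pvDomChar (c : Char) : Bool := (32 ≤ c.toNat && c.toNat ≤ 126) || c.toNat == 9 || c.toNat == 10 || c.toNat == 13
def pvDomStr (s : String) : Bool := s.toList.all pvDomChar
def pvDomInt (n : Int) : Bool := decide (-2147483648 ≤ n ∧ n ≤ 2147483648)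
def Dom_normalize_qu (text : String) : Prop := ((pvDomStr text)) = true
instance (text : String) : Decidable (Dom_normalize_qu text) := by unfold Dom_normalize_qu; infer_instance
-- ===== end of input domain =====

-- B replaces A's char-by-char iterator scan by staged passes: split on the substring "qu",
-- validate that no stray 'q' remains in a piece, re-emit the pieces with "qu" between them.
-- Both raise ValueError on a 'q' not immediately followed by 'u' (excluded by Pre_).

-- ===== PORT A =====
-- A pulls the next char from the iterator whenever it sees 'q'; on the raising
-- branches (next char missing or ≠ 'u') Python raises ValueError — those inputs
-- are excluded by Pre_normalize_qu, the port returns the list built so far.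
def normalize_quA : List Char → List String
  | [] => []
  | 'q' :: rest =>
      match rest with
      | 'u' :: rest' => "qu" :: normalize_quA rest'
      | _ => []          -- raise ValueError (outside Pre_)
  | c :: rest => String.ofList [c] :: normalize_quA rest

def normalize_qu (text : String) : List String := normalize_quA text.toList

-- ===== PORT B =====
-- s.split('qu'), ported by hand for this fixed 2-char non-empty separator:
-- scan left to right, cut at each (leftmost-first) occurrence of 'q','u' — exact
-- Python str.split semantics for a non-empty separator.
def splitQu : List Char → List (List Char)
  | [] => [[]]
  | 'q' :: 'u' :: rest => [] :: splitQu rest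
  | c :: rest =>
      match splitQu rest with
      | p :: ps => (c :: p) :: ps
      | [] => [[c]]      -- unreachable: splitQu never returns []

-- Python "'q' in p" for the 1-char needle 'q' is exactly list membership.
def normalize_qu_alt (text : String) : List String :=
  match splitQu text.toList with
  | [] => []             -- unreachable: split always yields at least one piece
  | first :: rest =>
      if first.contains 'q' || rest.any (fun p => p.contains 'q') then
        []               -- raise ValueError (outside Pre_)
      else
        first.map (fun c => String.ofList [c]) ++
          rest.flatMap (fun p => "qu" :: p.map (fun c => String.ofList [c]))

-- ===== PRECONDITION & SPEC =====
-- Pre_ excludes exactly the inputs on which A raises ValueError: some 'q' is not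
-- immediately followed by 'u' (including a trailing 'q').
def Pre_normalize_qu (text : String) : Prop :=
  ∀ i : Fin text.toList.length, text.toList.get i = 'q' →
    ∃ h : i.1 + 1 < text.toList.length, text.toList.get ⟨i.1 + 1, h⟩ = 'u'
instance (text : String) : Decidable (Pre_normalize_qu text) := by unfold Pre_normalize_qu; infer_instance

def pvWitness_normalize_qu : String := "quiet"

def Spec_normalize_qu (text : String) (out : List String) : Prop := out = normalize_qu_alt text
instance (text : String) (out : List String) : Decidable (Spec_normalize_qu text out) := by unfold Spec_normalize_qu; infer_instance

-- ===== CLAIM (what is proved, stated in full; the proofs are below) =====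
def Claim_equal_normalize_qu : Prop := ∀ (text : String), Dom_normalize_qu text → Pre_normalize_qu text → Spec_normalize_qu text (normalize_qu text)

-- ===== LEMMAS AND PROOFS =====

-- Pre_ on raw char lists
def PreL (l : List Char) : Prop :=
  ∀ i (h : i < l.length), l[i] = 'q' → ∃ h2 : i + 1 < l.length, l[i + 1] = 'u'

theorem PreL_tail {c : Char} {l : List Char} (h : PreL (c :: l)) : PreL l := by
  intro i hi hq
  obtain ⟨h2, hu⟩ := h (i + 1) (by simpa using Nat.succ_lt_succ hi) (by simpa using hq)
  simp only [List.length_cons] at h2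
  exact ⟨by omega, by simpa using hu⟩

theorem PreL_head_ne {c : Char} {l : List Char} (h : PreL (c :: l))
    (hne : ∀ l', c = 'q' → l = 'u' :: l' → False) : c ≠ 'q' := by
  intro hcq
  obtain ⟨h2, hu⟩ := h 0 (by simp) (by simpa using hcq)
  cases l with
  | nil => simp at h2
  | cons x xs => exact hne xs hcq (by simpa using hu ▸ rfl)

theorem splitQu_ne_nil (l : List Char) : splitQu l ≠ [] := by
  induction l using splitQu.induct with
  | case1 => simp [splitQu]
  | case2 rest ih => simp [splitQu]
  | case3 c rest hne p ps hsp ih => simp [splitQu, hsp]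
  | case4 c rest hne hsp ih => exact absurd hsp ih

-- When the head is not the start of a "qu" occurrence, both programs step over it.
theorem normalize_quA_cons {c : Char} {rest : List Char} (hcq : c ≠ 'q') :
    normalize_quA (c :: rest) = String.ofList [c] :: normalize_quA rest := by
  rw [normalize_quA.eq_def]
  split <;> simp_all

theorem splitQu_cons {c : Char} {rest : List Char}
    (hne : ∀ l', c = 'q' → rest = 'u' :: l' → False) {p : List Char} {ps : List (List Char)}
    (hsp : splitQu rest = p :: ps) : splitQu (c :: rest) = (c :: p) :: ps := by
  rw [splitQu.eq_def]
  split
  · simp_all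
  · rename_i rest' heq
    obtain ⟨hq, hu⟩ := List.cons_eq_cons.mp heq
    exact (hne rest' hq hu).elim
  · rename_i c' rest' hne' heq
    obtain ⟨rfl, rfl⟩ := List.cons_eq_cons.mp heq
    rw [hsp]

-- Under Pre_, no piece of the split contains a 'q'.
theorem splitQu_no_q (l : List Char) (h : PreL l) :
    ∀ p ∈ splitQu l, 'q' ∉ p := by
  induction l using splitQu.induct with
  | case1 => intro p hp; simp [splitQu] at hp; simp [hp]
  | case2 rest ih =>
      intro p hp
      simp only [splitQu, List.mem_cons] at hp
      rcases hp with rfl | hp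
      · simp
      · exact ih (PreL_tail (PreL_tail h)) p hp
  | case3 c rest hne p0 ps hsp ih =>
      have hcq : c ≠ 'q' := PreL_head_ne h hne
      intro p hp
      rw [splitQu_cons hne hsp] at hp
      rcases List.mem_cons.mp hp with rfl | hp
      · intro hq
        rcases List.mem_cons.mp hq with hq | hq
        · exact hcq hq.symm
        · exact ih (PreL_tail h) p0 (by simp [hsp]) hq
      · exact ih (PreL_tail h) p (by simp [hsp, hp])
  | case4 c rest hne hsp ih => exact absurd hsp (splitQu_ne_nil rest)

def renderPieces (first : List Char) (rest : List (List Char)) : List String :=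
  first.map (fun c => String.ofList [c]) ++
    rest.flatMap (fun p => "qu" :: p.map (fun c => String.ofList [c]))

-- Under Pre_, A's scan equals the split-and-rejoin rendering.
theorem A_eq_render (l : List Char) (h : PreL l) :
    normalize_quA l =
      match splitQu l with
      | [] => []
      | first :: rest => renderPieces first rest := by
  induction l using splitQu.induct with
  | case1 => simp [splitQu, normalize_quA, renderPieces]
  | case2 rest ih =>
      have ihr := ih (PreL_tail (PreL_tail h))
      cases hsp : splitQu rest with
      | nil => exact absurd hsp (splitQu_ne_nil rest)
      | cons p ps =>
          rw [hsp] at ihr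
          simp only [splitQu, normalize_quA, hsp, renderPieces] at *
          simp [ihr]
  | case3 c rest hne p ps hsp ih =>
      have hcq : c ≠ 'q' := PreL_head_ne h hne
      have ihr := ih (PreL_tail h)
      rw [hsp] at ihr
      rw [normalize_quA_cons hcq, splitQu_cons hne hsp, ihr]
      simp [renderPieces]
  | case4 c rest hne hsp ih => exact absurd hsp (splitQu_ne_nil rest)

theorem pre_to_preL (text : String) (h : Pre_normalize_qu text) : PreL text.toList := by
  intro i hi hq
  obtain ⟨h2, hu⟩ := h ⟨i, hi⟩ (by simpa using hq)
  exact ⟨h2, by simpa using hu⟩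

-- ===== VERDICT (by name: the statement is the Claim_ definition above) =====
theorem normalize_qu_spec : Claim_equal_normalize_qu := by
  intro text _ hpre
  show normalize_qu text = normalize_qu_alt text
  have hP := pre_to_preL text hpre
  unfold normalize_qu normalize_qu_alt
  rw [A_eq_render _ hP]
  cases hsp : splitQu text.toList with
  | nil => exact absurd hsp (splitQu_ne_nil text.toList)
  | cons first rest =>
      have hnoq := splitQu_no_q text.toList hP
      rw [hsp] at hnoq
      have h1 : first.contains 'q' = false := by
        simp only [List.contains_eq_mem]
        exact decide_eq_false (hnoq first (by simp))
      have h2 : rest.any (fun p => p.contains 'q') = false := by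
        rw [List.any_eq_false]
        intro p hp
        simp only [List.contains_eq_mem, decide_eq_true_eq]
        exact hnoq p (by simp [hp])
      simp only [h1, h2, Bool.or_false, if_neg, Bool.false_eq_true,
        not_false_eq_true, renderPieces]
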